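-- pv_equiv track=rewrite | github.com/MotoHuang/learn_python | HW3_cloud.py | find_a
-- ===== SOURCE A (Python) =====
-- import copy
--
-- def find_a(user_input_list: list, answer: list) -> tuple:
--     a = 0
--     new_list = copy.copy(user_input_list)
--     for index, num in enumerate(user_input_list):
--         if answer[index] == num:
--             new_list.remove(num)
--             a += 1
--     return a, new_list
-- ===== SOURCE B (Python) =====
-- def find_a(user_input_list: list, answer: list) -> tuple:
--     a = 0
--     need = {}
--     for num, ans in zip(user_input_list, answer):
--         if num == ans:
--             a += 1
--             need[num] = need.get(num, 0) + 1
--     out = []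
--     for num in user_input_list:
--         if need.get(num, 0) > 0:
--             need[num] = need.get(num, 0) - 1
--         else:
--             out.append(num)
--     return a, out
-- ===== Notes on version B (the rewrite author's own statement) =====
-- stated objective: faster
-- what changed: Replaces the repeated O(n) list.remove calls with a one-pass tally of matched values in a dict and a single rebuild pass that skips the first k occurrences of each matched value.
import Mathlib
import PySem

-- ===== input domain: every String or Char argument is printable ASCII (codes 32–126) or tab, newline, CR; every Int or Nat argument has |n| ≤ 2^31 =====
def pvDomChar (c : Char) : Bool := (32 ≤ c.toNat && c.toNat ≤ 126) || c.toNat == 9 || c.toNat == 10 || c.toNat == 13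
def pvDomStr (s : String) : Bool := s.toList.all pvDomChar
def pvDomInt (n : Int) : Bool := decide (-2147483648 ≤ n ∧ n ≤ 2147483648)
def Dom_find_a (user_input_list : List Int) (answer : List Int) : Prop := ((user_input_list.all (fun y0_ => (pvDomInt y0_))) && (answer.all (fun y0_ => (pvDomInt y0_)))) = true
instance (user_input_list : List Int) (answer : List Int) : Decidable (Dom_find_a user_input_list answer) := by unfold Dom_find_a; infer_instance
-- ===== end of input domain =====

-- B tallies matched values in a dict and rebuilds the list in one pass instead of A's repeated list.remove calls (objective: faster; return value only).


-- ===== PORT A =====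
-- Loop over enumerate(user_input_list); answer[index] via pyGet? (none = IndexError, excluded by Pre_);
-- new_list.remove(num) via remove? (the 'none' default is unreachable: num sits at a matched position, so it is in new_list).
def find_a (user_input_list : List Int) (answer : List Int) : Int × List Int :=
  (PySem.List.enumerate user_input_list 0).foldl
    (fun st p =>
      match PySem.List.pyGet? answer p.1 with
      | some v => if v == p.2 then (st.1 + 1, (PySem.List.remove? st.2 p.2).getD st.2) else st
      | none => st)
    (0, user_input_list)

-- ===== PORT B =====
-- First loop: count matches and tally matched values in a dict; second loop: rebuild, skipping tallied occurrences.
def find_a_alt (user_input_list : List Int) (answer : List Int) : Int × List Int :=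
  let s := (user_input_list.zip answer).foldl
    (fun (st : Int × PySem.Dict Int Int) p =>
      if p.1 == p.2 then (st.1 + 1, st.2.insert p.1 (st.2.getD p.1 0 + 1)) else st)
    (0, PySem.Dict.empty)
  let r := user_input_list.foldl
    (fun (st : PySem.Dict Int Int × List Int) num =>
      if st.1.getD num 0 > 0 then (st.1.insert num (st.1.getD num 0 - 1), st.2)
      else (st.1, st.2 ++ [num]))
    (s.2, ([] : List Int))
  (s.1, r.2)

-- ===== PRECONDITION & SPEC =====
-- A reads answer[index] for every index of user_input_list, so it raises IndexError unless answer is at least as long.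
def Pre_find_a (user_input_list : List Int) (answer : List Int) : Prop :=
  user_input_list.length ≤ answer.length
instance (user_input_list : List Int) (answer : List Int) : Decidable (Pre_find_a user_input_list answer) := by unfold Pre_find_a; infer_instance

def pvWitness_find_a : List Int × List Int := ([1, 2, 3], [1, 5, 3])

def Spec_find_a (user_input_list : List Int) (answer : List Int) (out : Int × List Int) : Prop := out = find_a_alt user_input_list answer
instance (user_input_list : List Int) (answer : List Int) (out : Int × List Int) : Decidable (Spec_find_a user_input_list answer out) := by unfold Spec_find_a; infer_instance

-- ===== CLAIM (what is proved, stated in full; the proofs are below) =====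
def Claim_equal_find_a : Prop := ∀ (user_input_list : List Int) (answer : List Int), Dom_find_a user_input_list answer → Pre_find_a user_input_list answer → Spec_find_a user_input_list answer (find_a user_input_list answer)

-- ===== LEMMAS AND PROOFS =====

-- A's loop body over a zipped pair list (index resolution already done).
def pvAFold (p : List (Int × Int)) (st : Int × List Int) : Int × List Int :=
  match p with
  | [] => st
  | (num, a) :: rest =>
      pvAFold rest (if a == num then (st.1 + 1, (PySem.List.remove? st.2 num).getD st.2) else st)

-- matched values, in order
def pvM (p : List (Int × Int)) : List Int := (p.filter (fun q => q.1 == q.2)).map Prod.fst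

-- abstract skip pass: drop the first (c v) occurrences of each value v
def pvSkip (l : List Int) (c : Int → Int) : List Int :=
  match l with
  | [] => []
  | x :: xs => if c x > 0 then pvSkip xs (fun v => if v = x then c v - 1 else c v)
               else x :: pvSkip xs c

theorem pvSkip_zero (l : List Int) (c : Int → Int) (h : ∀ v, c v ≤ 0) : pvSkip l c = l := by
  induction l with
  | nil => rfl
  | cons x xs ih =>
      simp only [pvSkip]
      rw [if_neg (by have := h x; omega)]
      rw [ih]

theorem pvSkip_erase (l : List Int) (num : Int) (hmem : num ∈ l) (c : Int → Int)
    (hc : ∀ v, 0 ≤ c v) :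
    pvSkip l (fun v => if v = num then c v + 1 else c v) = pvSkip (l.erase num) c := by
  induction l generalizing c with
  | nil => cases hmem
  | cons x xs ih =>
      by_cases hx : x = num
      · subst hx
        simp only [pvSkip, List.erase_cons_head]
        rw [if_pos (by simpa using by have := hc x; omega)]
        have hfun : (fun v => if v = x then (if v = x then c v + 1 else c v) - 1
                              else if v = x then c v + 1 else c v) = c := by
          funext v; by_cases hv : v = x <;> simp [hv]
        rw [hfun]
      · have hmem' : num ∈ xs := by
          cases hmem with
          | head => exact absurd rfl hx
          | tail _ h => exact h
        rw [List.erase_cons_tail (by simpa using hx)]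
        simp only [pvSkip]
        by_cases hcx : c x > 0
        · rw [if_pos (by simp [hx]; omega), if_pos hcx]
          have hfun : (fun v => if v = x then (if v = num then c v + 1 else c v) - 1
                                else if v = num then c v + 1 else c v)
              = (fun v => if v = num then (if v = x then c v - 1 else c v) + 1
                          else if v = x then c v - 1 else c v) := by
            funext v
            by_cases h1 : v = x
            · subst h1; simp [hx]
            · by_cases h2 : v = num
              · subst h2; simp [h1]
              · simp [h1, h2]
          rw [hfun, ih hmem' _ (by
            intro v
            by_cases h1 : v = x
            · subst h1; rw [if_pos rfl]; omega
            · simp only [if_neg h1]; exact hc v)]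
        · rw [if_neg (by simp [hx]; omega), if_neg hcx]
          rw [ih hmem' c hc]
      
theorem pvSkipFold (u : List Int) (d : PySem.Dict Int Int) (acc : List Int) :
    (u.foldl (fun (st : PySem.Dict Int Int × List Int) num =>
        if st.1.getD num 0 > 0 then (st.1.insert num (st.1.getD num 0 - 1), st.2)
        else (st.1, st.2 ++ [num])) (d, acc)).2
    = acc ++ pvSkip u (fun v => d.getD v 0) := by
  induction u generalizing d acc with
  | nil => simp [pvSkip]
  | cons x xs ih =>
      simp only [List.foldl_cons, pvSkip]
      by_cases hx : d.getD x 0 > 0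
      · rw [if_pos hx, if_pos hx, ih]
        have hfun : (fun v => (d.insert x (d.getD x 0 - 1)).getD v 0)
            = (fun v => if v = x then d.getD v 0 - 1 else d.getD v 0) := by
          funext v; rw [PySem.Dict.getD_insert]; by_cases hv : v = x <;> simp [hv]
        rw [hfun]
      · rw [if_neg hx, if_neg hx, ih]
        simp

theorem pvAFold_eq (p : List (Int × Int)) (a : Int) (l : List Int)
    (hfit : ∀ v, (pvM p).count v ≤ l.count v) :
    pvAFold p (a, l) = (a + ((p.countP (fun q => q.1 == q.2) : Nat) : Int),
                        pvSkip l (fun v => (((pvM p).count v : Nat) : Int))) := by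
  induction p generalizing a l with
  | nil =>
      simp only [pvAFold, pvM, List.filter_nil, List.map_nil, List.count_nil, List.countP_nil]
      rw [pvSkip_zero _ _ (by intro v; simp)]
      simp
  | cons q rest ih =>
      obtain ⟨num, av⟩ := q
      by_cases hm : av = num
      · subst hm
        have hM : pvM ((av, av) :: rest) = av :: pvM rest := by simp [pvM]
        have hmem : av ∈ l := by
          have h1 := hfit av
          rw [hM, List.count_cons_self] at h1
          exact List.count_pos_iff.mp (by omega)
        have hfit' : ∀ v, (pvM rest).count v ≤ (l.erase av).count v := by
          intro v
          by_cases hv : v = av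
          · subst hv
            have h1 := hfit v
            rw [hM, List.count_cons_self] at h1
            rw [List.count_erase_self]
            omega
          · rw [List.count_erase_of_ne hv]
            have h1 := hfit v
            rw [hM, List.count_cons_of_ne (fun h => hv h.symm)] at h1
            exact h1
        simp only [pvAFold, beq_self_eq_true, if_true,
          PySem.List.remove?_eq_some_erase l av hmem, Option.getD_some]
        rw [ih (a + 1) (l.erase av) hfit']
        refine Prod.ext ?_ ?_
        · simp only [List.countP_cons, beq_self_eq_true]
          push_cast
          ring
        · show pvSkip (l.erase av) (fun v => (((pvM rest).count v : Nat) : Int))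
              = pvSkip l (fun v => (((pvM ((av, av) :: rest)).count v : Nat) : Int))
          have hfun : (fun v => (((pvM ((av, av) :: rest)).count v : Nat) : Int))
              = (fun v => if v = av then (((pvM rest).count v : Nat) : Int) + 1
                          else (((pvM rest).count v : Nat) : Int)) := by
            funext v
            rw [hM]
            by_cases hv : v = av
            · subst hv; rw [List.count_cons_self, if_pos rfl]; push_cast; ring
            · rw [List.count_cons_of_ne (fun h => hv h.symm), if_neg hv]
          rw [hfun, pvSkip_erase l av hmem _ (by intro v; positivity)]
      · have hmb : ((av : Int) == num) = false := by simp [hm]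
        have hM : pvM ((num, av) :: rest) = pvM rest := by
          simp only [pvM, List.filter_cons]
          rw [if_neg (by simp; exact fun h => hm h.symm)]
        simp only [pvAFold, hmb, Bool.false_eq_true, if_false]
        rw [ih a l (by intro v; rw [← hM]; exact hfit v)]
        refine Prod.ext ?_ ?_
        · simp only [List.countP_cons]
          rw [if_neg (by simp; exact fun h => hm h.symm)]
          simp
        · show pvSkip l (fun v => (((pvM rest).count v : Nat) : Int))
              = pvSkip l (fun v => (((pvM ((num, av) :: rest)).count v : Nat) : Int))
          rw [hM]

theorem pvEnumFold (u rest pre : List Int) (h : u.length ≤ rest.length) (st : Int × List Int) :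
    (PySem.List.enumerate u (pre.length : Int)).foldl
      (fun st p =>
        match PySem.List.pyGet? (pre ++ rest) p.1 with
        | some v => if v == p.2 then (st.1 + 1, (PySem.List.remove? st.2 p.2).getD st.2) else st
        | none => st) st
    = pvAFold (u.zip rest) st := by
  induction u generalizing rest pre st with
  | nil => simp [PySem.List.enumerate_nil, pvAFold]
  | cons x xs ih =>
      cases rest with
      | nil => simp at h
      | cons r rs =>
          rw [PySem.List.enumerate_cons]
          simp only [List.foldl_cons, PySem.List.pyGet?_append_length]
          have hlen : (pre.length : Int) + 1 = ((pre ++ [r]).length : Int) := by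
            simp
          have happ : pre ++ r :: rs = (pre ++ [r]) ++ rs := by simp
          rw [hlen, happ, ih rs (pre ++ [r]) (by simpa using h)]
          simp only [List.zip_cons_cons, pvAFold]

theorem pvB_split (zs : List (Int × Int)) (a0 : Int) (d0 : PySem.Dict Int Int) :
    zs.foldl (fun (st : Int × PySem.Dict Int Int) p =>
        if p.1 == p.2 then (st.1 + 1, st.2.insert p.1 (st.2.getD p.1 0 + 1)) else st) (a0, d0)
    = (zs.foldl (fun a p => if p.1 == p.2 then a + 1 else a) a0,
       zs.foldl (fun (d : PySem.Dict Int Int) p =>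
         if p.1 == p.2 then d.insert p.1 (d.getD p.1 0 + 1) else d) d0) := by
  induction zs generalizing a0 d0 with
  | nil => rfl
  | cons q t ih =>
      simp only [List.foldl_cons]
      by_cases h : (q.1 == q.2) = true
      · rw [if_pos h, if_pos h, if_pos h]; exact ih _ _
      · rw [if_neg h, if_neg h, if_neg h]; exact ih _ _

theorem pvB_eq (u ans : List Int) :
    find_a_alt u ans
    = (0 + (((u.zip ans).countP (fun q => q.1 == q.2) : Nat) : Int),
       pvSkip u (fun v => (((pvM (u.zip ans)).count v : Nat) : Int))) := by
  have hdict : ∀ v, ((u.zip ans).foldl (fun (d : PySem.Dict Int Int) p =>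
        if p.1 == p.2 then d.insert p.1 (d.getD p.1 0 + 1) else d) PySem.Dict.empty).getD v 0
      = (((pvM (u.zip ans)).count v : Nat) : Int) := by
    intro v
    rw [PySem.List.foldl_if_eq_foldl_filter,
        ← List.foldl_map (f := Prod.fst)
          (g := fun (d : PySem.Dict Int Int) x => d.insert x (d.getD x 0 + 1)),
        PySem.Dict.getD_foldl_insert_add_one]
    simp [pvM]
  have hfun : (fun v => ((u.zip ans).foldl (fun (d : PySem.Dict Int Int) p =>
        if p.1 == p.2 then d.insert p.1 (d.getD p.1 0 + 1) else d) PySem.Dict.empty).getD v 0)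
      = (fun v => (((pvM (u.zip ans)).count v : Nat) : Int)) := funext hdict
  unfold find_a_alt
  simp only [pvB_split, pvSkipFold, List.nil_append, hfun, PySem.List.foldl_if_add_one]

-- ===== VERDICT (by name: the statement is the Claim_ definition above) =====
theorem find_a_spec : Claim_equal_find_a := by
  intro u ans _ hpre
  have hlen : u.length ≤ ans.length := hpre
  unfold Spec_find_a
  have hA : find_a u ans = pvAFold (u.zip ans) (0, u) := by
    unfold find_a
    have h := pvEnumFold u ans [] (by simpa using hlen) (0, u)
    simpa using h
  have hfit : ∀ v, (pvM (u.zip ans)).count v ≤ u.count v := by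
    intro v
    have hsub : (pvM (u.zip ans)).Sublist ((u.zip ans).map Prod.fst) :=
      List.Sublist.map Prod.fst List.filter_sublist
    have hmap : (u.zip ans).map Prod.fst = u := List.map_fst_zip hlen
    have := hsub.count_le v
    rwa [hmap] at this
  rw [hA, pvAFold_eq _ _ _ hfit, pvB_eq]
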